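-- pv_equiv track=rewrite | github.com/huggingface/open-muse | scripts/m4_annotate.py | distribute_shards
-- ===== SOURCE A (Python) =====
-- def distribute_shards(start_shard_all, end_shard_all, ntasks):
--     total_shards = end_shard_all - start_shard_all + 1
--     shards_per_task = total_shards // ntasks
--     shards_per_task = [shards_per_task] * ntasks
--
--     # to distribute the remainder of tasks for non-evenly divisible number of shards
--     left_over_shards = total_shards % ntasks
--
--     for task_idx in range(left_over_shards):
--         shards_per_task[task_idx] += 1
--
--     assert sum(shards_per_task) == total_shards
--
--     distributed_shards = []
--
--     for task_idx in range(len(shards_per_task)):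
--         if task_idx == 0:
--             start_shard = start_shard_all
--         else:
--             start_shard = distributed_shards[task_idx - 1][1] + 1
--
--         end_shard = start_shard + shards_per_task[task_idx] - 1
--         distributed_shards.append((start_shard, end_shard))
--
--     assert sum([end_shard - start_shard + 1 for start_shard, end_shard in distributed_shards]) == total_shards
--
--     return distributed_shards
-- ===== SOURCE B (Python) =====
-- def distribute_shards(start_shard_all, end_shard_all, ntasks):
--     total_shards = end_shard_all - start_shard_all + 1
--     base, rem = divmod(total_shards, ntasks)
--     distributed_shards = []
--     for i in range(ntasks):
--         start = start_shard_all + i * base + min(i, rem)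
--         count = base + (1 if i < rem else 0)
--         distributed_shards.append((start, start + count - 1))
--     return distributed_shards
-- ===== Notes on version B (the rewrite author's own statement) =====
-- stated objective: simpler
-- what changed: Replaces A's two-phase accumulator construction (a per-task count list patched by a remainder loop, then a second loop deriving each start from the previous entry's end) with one loop computing every range in closed form from its task index (start = start_shard_all + i*base + min(i, rem)).
import Mathlib
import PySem

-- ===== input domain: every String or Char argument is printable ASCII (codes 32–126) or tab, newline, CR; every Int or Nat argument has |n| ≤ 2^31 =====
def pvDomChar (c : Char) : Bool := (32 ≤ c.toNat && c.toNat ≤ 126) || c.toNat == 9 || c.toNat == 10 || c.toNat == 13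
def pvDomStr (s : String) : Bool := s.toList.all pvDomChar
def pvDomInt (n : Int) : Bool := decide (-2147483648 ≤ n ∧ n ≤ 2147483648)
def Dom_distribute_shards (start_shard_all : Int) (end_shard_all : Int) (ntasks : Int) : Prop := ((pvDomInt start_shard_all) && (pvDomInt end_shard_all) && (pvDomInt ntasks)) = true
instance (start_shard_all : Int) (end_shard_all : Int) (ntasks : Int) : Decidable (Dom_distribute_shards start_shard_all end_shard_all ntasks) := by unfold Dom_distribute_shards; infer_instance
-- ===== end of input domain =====

-- B replaces A's accumulator construction (remainder-patched count list + start chained from the previous end)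
-- with one loop computing each task's range in closed form from its index; same cost, simpler ("simpler", not faster).


-- ===== PORT A =====
-- Literal port of A. Python's asserts never fail inside Pre_ (excluded otherwise); list indices
-- task_idx / task_idx-1 are nonnegative wherever they are evaluated, so .toNat is exact there.
def distribute_shards (start_shard_all : Int) (end_shard_all : Int) (ntasks : Int) : List (Int × Int) :=
  let total_shards := end_shard_all - start_shard_all + 1
  let q := PySem.Int.floordiv total_shards ntasks        -- raises ZeroDivisionError iff ntasks = 0: outside Pre_
  let shards_per_task := List.replicate ntasks.toNat q   -- [q] * ntasks (empty for ntasks ≤ 0, like Python)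
  let left_over := PySem.Int.mod total_shards ntasks
  let shards_per_task := (PySem.List.pyRange 0 left_over 1).foldl
      (fun l i => l.set i.toNat (l.getD i.toNat 0 + 1)) shards_per_task
  (PySem.List.pyRange 0 (shards_per_task.length : Int) 1).foldl
    (fun acc i =>
      let start := if i = 0 then start_shard_all else (acc.getD (i - 1).toNat (0, 0)).2 + 1
      acc ++ [(start, start + shards_per_task.getD i.toNat 0 - 1)]) []

-- ===== PORT B =====
-- Literal port of B (Source B): base, rem = divmod(total, ntasks); one loop, each range closed-form from i.
def distribute_shards_alt (start_shard_all : Int) (end_shard_all : Int) (ntasks : Int) : List (Int × Int) :=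
  let total_shards := end_shard_all - start_shard_all + 1
  let base := PySem.Int.floordiv total_shards ntasks     -- divmod: raises ZeroDivisionError iff ntasks = 0
  let rem := PySem.Int.mod total_shards ntasks
  (PySem.List.pyRange 0 ntasks 1).foldl
    (fun acc i =>
      let start := start_shard_all + i * base + min i rem
      let count := base + (if i < rem then 1 else 0)
      acc ++ [(start, start + count - 1)]) []

-- ===== PRECONDITION & SPEC =====
-- Pre_ excludes exactly the inputs where A raises: ntasks = 0 (ZeroDivisionError) and ntasks < 0 with a
-- nonzero shard count (the per-task list [x]*ntasks is empty, so A's first assert fails: AssertionError).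
def Pre_distribute_shards (start_shard_all : Int) (end_shard_all : Int) (ntasks : Int) : Prop :=
  0 < ntasks ∨ (ntasks < 0 ∧ end_shard_all - start_shard_all + 1 = 0)
instance (start_shard_all : Int) (end_shard_all : Int) (ntasks : Int) : Decidable (Pre_distribute_shards start_shard_all end_shard_all ntasks) := by unfold Pre_distribute_shards; infer_instance
def pvWitness_distribute_shards : Int × Int × Int := (3, 12, 4)

def Spec_distribute_shards (start_shard_all : Int) (end_shard_all : Int) (ntasks : Int) (out : List (Int × Int)) : Prop := out = distribute_shards_alt start_shard_all end_shard_all ntasks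
instance (start_shard_all : Int) (end_shard_all : Int) (ntasks : Int) (out : List (Int × Int)) : Decidable (Spec_distribute_shards start_shard_all end_shard_all ntasks out) := by unfold Spec_distribute_shards; infer_instance

-- ===== CLAIM (what is proved, stated in full; the proofs are below) =====
def Claim_equal_distribute_shards : Prop := ∀ (start_shard_all : Int) (end_shard_all : Int) (ntasks : Int), Dom_distribute_shards start_shard_all end_shard_all ntasks → Pre_distribute_shards start_shard_all end_shard_all ntasks → Spec_distribute_shards start_shard_all end_shard_all ntasks (distribute_shards start_shard_all end_shard_all ntasks)

-- ===== LEMMAS AND PROOFS =====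

-- Prefix sums of the per-task counts.
def pvSum (c : Nat → Int) (i : Nat) : Int := ((List.range i).map c).sum

theorem pvSum_succ (c : Nat → Int) (i : Nat) : pvSum c (i + 1) = pvSum c i + c i := by
  simp [pvSum, List.range_succ]

-- The remainder-increment loop preserves length …
theorem inc_length (js : List Nat) (l : List Int) :
    (js.foldl (fun l j => l.set j (l.getD j 0 + 1)) l).length = l.length := by
  induction js generalizing l with
  | nil => rfl
  | cons j js ih => rw [List.foldl_cons, ih, List.length_set]

-- … and adds 1 exactly at the indices below m (within the list).
theorem inc_getD (m : Nat) (l : List Int) (i : Nat) (hi : i < l.length) :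
    ((List.range m).foldl (fun l j => l.set j (l.getD j 0 + 1)) l).getD i 0
      = l.getD i 0 + (if i < m then 1 else 0) := by
  induction m with
  | zero => simp
  | succ m ih =>
    rw [List.range_succ, List.foldl_append]
    simp only [List.foldl_cons, List.foldl_nil]
    set L := (List.range m).foldl (fun l j => l.set j (l.getD j 0 + 1)) l with hL
    have hlen : L.length = l.length := inc_length _ _
    rw [List.getD_eq_getElem?_getD, List.getElem?_set]
    by_cases h : m = i
    · subst h
      simp [hlen, hi]
      simp at ih
      rw [← List.getD_eq_getElem L 0 (by rw [hlen]; exact hi), ← List.getD_eq_getElem l 0 hi]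
      simpa using ih
    · have : (if i < m + 1 then (1:Int) else 0) = (if i < m then 1 else 0) := by
        by_cases h' : i < m <;> simp [h'] <;> omega
      rw [if_neg h, ← List.getD_eq_getElem?_getD, ih, this]

-- Characterisation of A's chained build loop: element i starts at s + (sum of counts below i).
theorem buildA_eq (s : Int) (c : Nat → Int) (m : Nat) :
    (List.range m).foldl
      (fun acc i =>
        acc ++ [((if i = 0 then s else (acc.getD (i - 1) ((0:Int), (0:Int))).2 + 1),
                 (if i = 0 then s else (acc.getD (i - 1) ((0:Int), (0:Int))).2 + 1) + c i - 1)]) []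
      = (List.range m).map (fun i => (s + pvSum c i, s + pvSum c (i + 1) - 1)) := by
  induction m with
  | zero => rfl
  | succ m ih =>
    rw [List.range_succ, List.foldl_append, ih, List.map_append]
    simp only [List.foldl_cons, List.foldl_nil, List.map_cons, List.map_nil]
    have hstart : (if m = 0 then s
        else (((List.range m).map (fun i => (s + pvSum c i, s + pvSum c (i + 1) - 1))).getD (m - 1) ((0:Int), (0:Int))).2 + 1)
        = s + pvSum c m := by
      cases m with
      | zero => simp [pvSum]
      | succ k =>
        rw [if_neg (Nat.succ_ne_zero k)]
        have : k + 1 - 1 = k := rfl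
        rw [this, PySem.List.getD_map_range _ _ _ _ (Nat.lt_succ_self k)]
        ring
    rw [hstart, pvSum_succ]
    ring_nf

-- pvSum of the balanced counts in closed form.
theorem pvSum_counts (q : Int) (rn : Nat) (i : Nat) (c : Nat → Int)
    (hc : ∀ j, j < i → c j = q + (if j < rn then 1 else 0)) :
    pvSum c i = i * q + ((min i rn : Nat) : Int) := by
  induction i with
  | zero => simp [pvSum]
  | succ i ih =>
    rw [pvSum_succ, ih (fun j hj => hc j (Nat.lt_succ_of_lt hj)), hc i (Nat.lt_succ_self i)]
    have : ((min (i + 1) rn : Nat) : Int) = ((min i rn : Nat) : Int) + (if i < rn then 1 else 0) := by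
      by_cases h : i < rn <;> simp [h] <;> [skip; push_cast] <;> omega
    rw [this]; push_cast; ring

-- ===== VERDICT (by name: the statement is the Claim_ definition above) =====
theorem distribute_shards_spec : Claim_equal_distribute_shards := by
  intro s e n _ hpre
  unfold Spec_distribute_shards
  simp only [distribute_shards, distribute_shards_alt]
  rcases hpre with hn | ⟨hn, htot⟩
  · -- main case: 0 < ntasks
    set total := e - s + 1 with htotal
    set q := PySem.Int.floordiv total n with hq
    set rem := PySem.Int.mod total n with hrem
    have hr0 : 0 ≤ rem := PySem.Int.mod_nonneg total hn
    have hrlt : rem < n := PySem.Int.mod_lt total hn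
    set m := n.toNat with hm
    have hnm : n = (m : Int) := by omega
    set rn := rem.toNat with hrn
    have hremn : rem = (rn : Int) := by omega
    have hrnm : rn ≤ m := by omega
    -- the incremented count list
    set spt0 := List.replicate m q with hspt0
    have hinc : (PySem.List.pyRange 0 rem 1).foldl
        (fun l i => l.set i.toNat (l.getD i.toNat 0 + 1)) spt0
        = (List.range rn).foldl (fun l j => l.set j (l.getD j 0 + 1)) spt0 := by
      rw [PySem.List.pyRange_one, List.foldl_map]
      congr 1
      · funext l j; simp
      · rw [hremn]; simp
    rw [hinc]
    set spt := (List.range rn).foldl (fun l j => l.set j (l.getD j 0 + 1)) spt0 with hspt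
    have hlen : spt.length = m := by rw [hspt, inc_length, hspt0, List.length_replicate]
    have hcnt : ∀ j, j < m → spt.getD j 0 = q + (if j < rn then 1 else 0) := by
      intro j hj
      rw [hspt, inc_getD rn spt0 j (by rw [hspt0, List.length_replicate]; exact hj),
        hspt0, List.getD_replicate q hj]
    -- A's outer loop → map over List.range m
    have hA : (PySem.List.pyRange 0 (spt.length : Int) 1).foldl
        (fun acc i =>
          acc ++ [((if i = 0 then s else (acc.getD (i - 1).toNat ((0:Int), (0:Int))).2 + 1),
                   (if i = 0 then s else (acc.getD (i - 1).toNat ((0:Int), (0:Int))).2 + 1) + spt.getD i.toNat 0 - 1)]) []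
        = (List.range m).map (fun i => (s + pvSum (fun j => spt.getD j 0) i,
                                        s + pvSum (fun j => spt.getD j 0) (i + 1) - 1)) := by
      rw [← buildA_eq s (fun j => spt.getD j 0) m, hlen, PySem.List.pyRange_one, List.foldl_map]
      congr 1
      funext acc k
      simp
    rw [hA, hnm, PySem.List.pyRange_one, List.foldl_map,
      PySem.List.foldl_append_singleton_eq_map]
    simp only [List.nil_append, sub_zero, Int.toNat_natCast, zero_add]
    apply List.map_congr_left
    intro k hk
    rw [List.mem_range] at hk
    have hs1 : pvSum (fun j => spt.getD j 0) k = (k:Int) * q + ((min k rn : Nat) : Int) :=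
      pvSum_counts q rn k _ (fun j hj => hcnt j (by omega))
    have hs2 : pvSum (fun j => spt.getD j 0) (k + 1) = ((k+1:Nat):Int) * q + ((min (k+1) rn : Nat) : Int) :=
      pvSum_counts q rn (k+1) _ (fun j hj => hcnt j (by omega))
    have hmin : min ((k:Nat):Int) rem = ((min k rn : Nat) : Int) := by
      rw [hremn]; push_cast; omega
    have hite : (if ((k:Nat):Int) < rem then (1:Int) else 0) = (if k < rn then 1 else 0) := by
      rw [hremn]; by_cases h : k < rn <;> simp [h]
    simp only [Prod.mk.injEq]
    refine ⟨?_, ?_⟩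
    · rw [hs1, hmin]; ring
    · rw [hs2, hmin, hite]
      have : ((min (k+1) rn : Nat) : Int) = ((min k rn : Nat) : Int) + (if k < rn then 1 else 0) := by
        by_cases h : k < rn <;> simp [h] <;> [skip; push_cast] <;> omega
      rw [this]; push_cast; ring_nf
  · -- degenerate case: ntasks < 0 and total = 0 (A returns [], B returns [])
    have h1 : n.toNat = 0 := by omega
    have h2 : PySem.Int.mod (e - s + 1) n = 0 := by rw [htot]; simp [PySem.Int.mod]
    have h3 : PySem.List.pyRange 0 n 1 = [] := by
      rw [PySem.List.pyRange_one]
      have : (n - 0).toNat = 0 := by omega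
      rw [this]; rfl
    simp [h1, h2, h3]
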